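-- pv_equiv track=rewrite | github.com/plpxsk/rag-lette | src/rag/config.py | _resolve_model_only
-- ===== SOURCE A (Python) =====
-- def _resolve_model_only(
--     model: str,
--     aliases: dict[str, tuple[str, str]],
--     default_provider: str,
-- ) -> tuple[str, str]:
--     if model in aliases:
--         return aliases[model]
--     matches = {provider for provider, alias_model in aliases.values() if alias_model == model}
--     if not matches:
--         return default_provider, model
--     if default_provider in matches:
--         return default_provider, model
--     provider = sorted(matches)[0]
--     return provider, model
-- ===== SOURCE B (Python) =====
-- def _resolve_model_only(
--     model: str,
--     aliases: dict[str, tuple[str, str]],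
--     default_provider: str,
-- ) -> tuple[str, str]:
--     if model in aliases:
--         return aliases[model]
--     best = None
--     for provider, alias_model in aliases.values():
--         if alias_model == model:
--             if provider == default_provider:
--                 return default_provider, model
--             if best is None or provider < best:
--                 best = provider
--     if best is None:
--         return default_provider, model
--     return best, model
-- ===== Notes on version B (the rewrite author's own statement) =====
-- stated objective: simpler
-- what changed: Replaces the set comprehension plus sorted(matches)[0] and the trailing branch chain with a single pass over aliases.values() that keeps a running lexicographic minimum provider and returns early when the default provider matches.
import Mathlib
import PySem

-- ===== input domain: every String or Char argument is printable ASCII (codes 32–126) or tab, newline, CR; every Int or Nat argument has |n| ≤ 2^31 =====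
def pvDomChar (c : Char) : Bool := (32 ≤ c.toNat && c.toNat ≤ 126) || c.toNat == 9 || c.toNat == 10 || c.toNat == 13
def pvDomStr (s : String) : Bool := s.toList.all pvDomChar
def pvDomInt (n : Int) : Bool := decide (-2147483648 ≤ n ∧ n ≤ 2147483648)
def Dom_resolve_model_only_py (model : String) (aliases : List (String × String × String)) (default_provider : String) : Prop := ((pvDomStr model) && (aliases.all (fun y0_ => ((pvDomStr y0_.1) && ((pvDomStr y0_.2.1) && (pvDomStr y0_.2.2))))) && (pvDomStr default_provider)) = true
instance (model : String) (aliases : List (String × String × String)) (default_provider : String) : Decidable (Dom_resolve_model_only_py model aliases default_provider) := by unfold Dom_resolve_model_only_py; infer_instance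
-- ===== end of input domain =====

-- B replaces A's set comprehension + sorted(matches)[0] + trailing branch chain by one pass over the
-- values keeping a running minimum provider, with an early return on the default provider (objective: simpler).

-- ===== PORT A =====
def resolve_model_only_py (model : String) (aliases : List (String × String × String)) (default_provider : String) : String × String :=
  let d : PySem.Dict String (String × String) := PySem.Dict.mk aliases
  match PySem.Dict.get? d model with
  | some v => v
  | none =>
    let matchset : PySem.Set String :=
      (PySem.Dict.values d).foldl
        (fun s pv => if pv.2 == model then PySem.Set.add s pv.1 else s) PySem.Set.empty
    if matchset = [] then (default_provider, model)
    else if PySem.Set.contains matchset default_provider then (default_provider, model)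
    else ((PySem.List.sorted matchset (fun x => x) false).headD "", model)

-- ===== PORT B =====
-- the for-loop of Source B over aliases.values(), with its running minimum `best`
def pvAltLoop (model default_provider : String) (best : Option String) : List (String × String) → String × String
  | [] =>
    match best with
    | none => (default_provider, model)
    | some b => (b, model)
  | pv :: rest =>
    if pv.2 == model then
      if pv.1 == default_provider then (default_provider, model)
      else if (match best with | none => true | some b => decide (pv.1 < b)) then
        pvAltLoop model default_provider (some pv.1) rest
      else pvAltLoop model default_provider best rest
    else pvAltLoop model default_provider best rest

def resolve_model_only_py_alt (model : String) (aliases : List (String × String × String)) (default_provider : String) : String × String :=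
  let d : PySem.Dict String (String × String) := PySem.Dict.mk aliases
  match PySem.Dict.get? d model with
  | some v => v
  | none => pvAltLoop model default_provider none (PySem.Dict.values d)

-- ===== PRECONDITION & SPEC =====
def Spec_resolve_model_only_py (model : String) (aliases : List (String × String × String)) (default_provider : String) (out : String × String) : Prop := out = resolve_model_only_py_alt model aliases default_provider
instance (model : String) (aliases : List (String × String × String)) (default_provider : String) (out : String × String) : Decidable (Spec_resolve_model_only_py model aliases default_provider out) := by unfold Spec_resolve_model_only_py; infer_instance

-- ===== CLAIM (what is proved, stated in full; the proofs are below) =====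
def Claim_equal_resolve_model_only_py : Prop := ∀ (model : String) (aliases : List (String × String × String)) (default_provider : String), Dom_resolve_model_only_py model aliases default_provider → Spec_resolve_model_only_py model aliases default_provider (resolve_model_only_py model aliases default_provider)

-- ===== LEMMAS AND PROOFS =====

-- the providers of the values whose alias model is `model`, in value order
def pvMatched (model : String) (vals : List (String × String)) : List String :=
  (vals.filter (fun pv => pv.2 == model)).map Prod.fst

-- the running minimum of Source B's loop, as a fold
def pvRunMin (best : Option String) (L : List String) : Option String :=
  L.foldl (fun b x => match b with | none => some x | some b => if x < b then some x else some b) best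

theorem pvMatched_cons (model : String) (pv : String × String) (vals : List (String × String)) :
    pvMatched model (pv :: vals) =
      if pv.2 == model then pv.1 :: pvMatched model vals else pvMatched model vals := by
  simp [pvMatched, List.filter_cons]
  split <;> simp

theorem pvRunMin_cons_some (a x : String) (L : List String) :
    pvRunMin (some a) (x :: L) = pvRunMin (if x < a then some x else some a) L := rfl

theorem pvRunMin_cons_none (x : String) (L : List String) :
    pvRunMin none (x :: L) = pvRunMin (some x) L := rfl

theorem pvFold_eq_update (model : String) (vals : List (String × String)) :
    ∀ s : PySem.Set String,
      vals.foldl (fun s pv => if pv.2 == model then PySem.Set.add s pv.1 else s) s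
        = PySem.Set.update s (pvMatched model vals) := by
  induction vals with
  | nil => intro s; simp [pvMatched, PySem.Set.update_nil]
  | cons pv rest ih =>
    intro s
    rw [pvMatched_cons]
    rw [List.foldl_cons]
    by_cases h : pv.2 == model
    · rw [if_pos h, if_pos h, ih, PySem.Set.update_cons]
    · rw [if_neg h, if_neg h, ih]

theorem pvAltLoop_spec (model dp : String) (vals : List (String × String)) :
    ∀ best : Option String,
      pvAltLoop model dp best vals =
        if dp ∈ pvMatched model vals then (dp, model)
        else
          match pvRunMin best (pvMatched model vals) with
          | none => (dp, model)
          | some b => (b, model) := by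
  induction vals with
  | nil => intro best; simp [pvAltLoop, pvMatched, pvRunMin]
  | cons pv rest ih =>
    intro best
    rw [pvMatched_cons]
    by_cases hm : pv.2 == model
    · by_cases hd : pv.1 == dp
      · have hdq : pv.1 = dp := by simpa using hd
        simp [pvAltLoop, hm, hdq]
      · have hne : pv.1 ≠ dp := by simpa using hd
        have hmem : (dp ∈ pv.1 :: pvMatched model rest) ↔ dp ∈ pvMatched model rest := by
          simp [List.mem_cons, (Ne.symm hne)]
        cases best with
        | none =>
          simp [pvAltLoop, hm, hd, ih, hmem, pvRunMin_cons_none]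
        | some b =>
          by_cases hlt : pv.1 < b
          · simp [pvAltLoop, hm, hd, hlt, ih, hmem, pvRunMin_cons_some]
          · simp [pvAltLoop, hm, hd, hlt, ih, hmem, pvRunMin_cons_some]
    · rw [if_neg hm]
      simp only [pvAltLoop, hm, Bool.false_eq_true, if_false]
      exact ih best

theorem pvRunMin_some (L : List String) :
    ∀ a : String, ∃ b, pvRunMin (some a) L = some b ∧ (b = a ∨ b ∈ L) ∧ b ≤ a ∧ ∀ y ∈ L, b ≤ y := by
  induction L with
  | nil => intro a; exact ⟨a, rfl, Or.inl rfl, le_refl a, by simp⟩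
  | cons x L ih =>
    intro a
    by_cases hlt : x < a
    · obtain ⟨b, hb, hmem, hba, hall⟩ := ih x
      refine ⟨b, ?_, ?_, le_of_lt (lt_of_le_of_lt hba hlt), ?_⟩
      · rw [pvRunMin_cons_some, if_pos hlt]; exact hb
      · cases hmem with
        | inl h => exact Or.inr (by simp [h])
        | inr h => exact Or.inr (by simp [h])
      · intro y hy
        rcases List.mem_cons.mp hy with h | h
        · exact h ▸ hba
        · exact hall y h
    · obtain ⟨b, hb, hmem, hba, hall⟩ := ih a
      refine ⟨b, ?_, ?_, hba, ?_⟩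
      · rw [pvRunMin_cons_some, if_neg hlt]; exact hb
      · cases hmem with
        | inl h => exact Or.inl h
        | inr h => exact Or.inr (by simp [h])
      · intro y hy
        rcases List.mem_cons.mp hy with h | h
        · exact h ▸ le_trans hba (le_of_not_gt hlt)
        · exact hall y h

-- the two `none` branches agree
theorem pvBranch_eq (model dp : String) (vals : List (String × String)) :
    (if (vals.foldl (fun s pv => if pv.2 == model then PySem.Set.add s pv.1 else s)
          PySem.Set.empty) = ([] : List String) then (dp, model)
     else if PySem.Set.contains
          (vals.foldl (fun s pv => if pv.2 == model then PySem.Set.add s pv.1 else s)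
            PySem.Set.empty) dp then (dp, model)
     else ((PySem.List.sorted
          (vals.foldl (fun s pv => if pv.2 == model then PySem.Set.add s pv.1 else s)
            PySem.Set.empty) (fun x => x) false).headD "", model))
      = pvAltLoop model dp none vals := by
  have hset : (vals.foldl (fun s pv => if pv.2 == model then PySem.Set.add s pv.1 else s)
      PySem.Set.empty) = PySem.Set.ofList (pvMatched model vals) := by
    rw [pvFold_eq_update model vals PySem.Set.empty]; rfl
  rw [hset, pvAltLoop_spec]
  cases hL : pvMatched model vals with
  | nil => simp [PySem.Set.ofList_nil, pvRunMin]
  | cons x L =>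
    have hnil : PySem.Set.ofList (x :: L) ≠ ([] : List String) := by
      intro h
      have hx : x ∈ PySem.Set.ofList (x :: L) := by
        rw [PySem.Set.mem_ofList]; simp
      rw [h] at hx; simp at hx
    by_cases hdp : dp ∈ (x :: L)
    · have hc : PySem.Set.contains (PySem.Set.ofList (x :: L)) dp = true := by
        rw [PySem.Set.contains_iff, PySem.Set.mem_ofList]; exact hdp
      simp [hnil, hdp]
    · have hc : PySem.Set.contains (PySem.Set.ofList (x :: L)) dp = false := by
        rw [Bool.eq_false_iff]
        intro h
        exact hdp ((PySem.Set.mem_ofList _ _).mp ((PySem.Set.contains_iff _ _).mp h))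
      obtain ⟨b, hb, hbmem, hbx, hball⟩ := pvRunMin_some L x
      have hrun : pvRunMin none (x :: L) = some b := by
        rw [pvRunMin_cons_none]; exact hb
      have hbmem' : b ∈ (x :: L) := by
        cases hbmem with
        | inl h => simp [h]
        | inr h => simp [h]
      have hball' : ∀ y ∈ (x :: L), b ≤ y := by
        intro y hy
        rcases List.mem_cons.mp hy with h | h
        · exact h ▸ hbx
        · exact hball y h
      cases hs : PySem.List.sorted (PySem.Set.ofList (x :: L)) (fun x => x) false with
      | nil =>
        exact absurd ((PySem.List.sorted_eq_nil_iff _ _ _).mp hs) hnil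
      | cons m t =>
        have hm_mem' : m ∈ (x :: L) := by
          have hm : m ∈ PySem.List.sorted (PySem.Set.ofList (x :: L)) (fun x => x) false := by
            rw [hs]; simp
          exact (PySem.Set.mem_ofList _ _).mp ((PySem.List.mem_sorted _ _ _ _).mp hm)
        have hm_min : ∀ y ∈ (x :: L), m ≤ y := by
          intro y hy
          exact PySem.List.key_head_sorted_le _ _ hs y ((PySem.Set.mem_ofList _ _).mpr hy)
        have hmb : m = b := le_antisymm (hm_min b hbmem') (hball' m hm_mem')
        simp [hnil, hdp, hrun, hmb]

-- ===== VERDICT (by name: the statement is the Claim_ definition above) =====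
theorem resolve_model_only_py_spec : Claim_equal_resolve_model_only_py := by
  intro model aliases default_provider _
  unfold Spec_resolve_model_only_py resolve_model_only_py resolve_model_only_py_alt
  cases h : PySem.Dict.get? (PySem.Dict.mk aliases) model with
  | some v => simp [h]
  | none => simpa [h] using pvBranch_eq model default_provider (PySem.Dict.values (PySem.Dict.mk aliases))
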